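-- pv_equiv track=rewrite | github.com/krish-modi1/Team2-DR | optimization_fuyao/tictactoe_4x4_bitboard.py | transform_mask
-- ===== SOURCE A (Python) =====
-- from typing import Tuple, Dict, List
--
-- def transform_mask(mask: int, mapping: List[int]) -> int:
--     # Build new mask by moving bit at old position p to new position mapping[p]
--     new_mask = 0
--     m = mask
--     while m:
--         lsb = m & -m
--         p = (lsb.bit_length() - 1)
--         new_mask |= (1 << mapping[p])
--         m ^= lsb
--     return new_mask
-- ===== SOURCE B (Python) =====
-- from typing import List
--
-- def transform_mask(mask: int, mapping: List[int]) -> int: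
--     # Positional scan: test every bit position of mask directly instead of
--     # extracting set bits with lsb arithmetic.
--     new_mask = 0
--     for p in range(mask.bit_length()):
--         if (mask >> p) & 1:
--             new_mask |= 1 << mapping[p]
--     return new_mask
-- ===== Notes on version B (the rewrite author's own statement) =====
-- stated objective: idiomatic
-- what changed: B replaces A's set-bit extraction loop (lsb = m & -m, bit_length, xor-clearing) by a plain positional scan: for each p in range(mask.bit_length()) test (mask >> p) & 1 and OR 1 << mapping[p] into the result.
import Mathlib
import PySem

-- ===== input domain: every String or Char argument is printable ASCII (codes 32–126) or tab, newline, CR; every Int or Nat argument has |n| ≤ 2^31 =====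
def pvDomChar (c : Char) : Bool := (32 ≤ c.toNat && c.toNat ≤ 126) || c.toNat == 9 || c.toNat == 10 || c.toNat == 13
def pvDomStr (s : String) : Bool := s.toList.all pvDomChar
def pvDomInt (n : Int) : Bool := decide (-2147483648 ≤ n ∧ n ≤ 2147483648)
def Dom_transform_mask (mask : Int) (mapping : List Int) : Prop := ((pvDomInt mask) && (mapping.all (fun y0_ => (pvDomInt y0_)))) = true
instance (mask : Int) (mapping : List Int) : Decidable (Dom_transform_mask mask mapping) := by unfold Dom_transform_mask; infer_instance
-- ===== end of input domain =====

-- B replaces A's set-bit extraction (lsb = m & -m loop) by a positional scan of all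
-- bit positions up to mask.bit_length() (objective: idiomatic; same cost).

-- ===== PORT A =====
-- Python's 'while m' loop; fuel = mask.natAbs + 1 only makes the recursion total:
-- m strictly decreases each iteration while 0 < m, so the fuel is never exhausted on
-- inputs in Pre_ (for mask < 0 Python diverges; such inputs are outside Pre_).
def tmLoopA (mapping : List Int) (fuel : Nat) (newMask m : Int) : Int :=
  match fuel with
  | 0 => newMask
  | fuel + 1 =>
    if m = 0 then newMask
    else
      let lsb := PySem.Int.band m (-m)
      let p : Nat := PySem.Int.bitLength lsb - 1
      -- 1 << mapping[p]: shift count as Nat is exact since Pre_ gives 0 ≤ mapping[p]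
      -- (Python raises ValueError on a negative shift, excluded by Pre_)
      let newMask' := PySem.Int.bor newMask ((1 : Int) <<< (PySem.List.pyGetD mapping (p : Int) 0).toNat)
      tmLoopA mapping fuel newMask' (PySem.Int.bxor m lsb)

def transform_mask (mask : Int) (mapping : List Int) : Int :=
  tmLoopA mapping (mask.natAbs + 1) 0 mask

-- ===== PORT B =====
-- for p in range(mask.bit_length()): if (mask >> p) & 1: new_mask |= 1 << mapping[p]
-- p.toNat is exact: p comes from range(...) so 0 ≤ p; shift count toNat exact under Pre_.
def transform_mask_alt (mask : Int) (mapping : List Int) : Int :=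
  (PySem.List.pyRange 0 (PySem.Int.bitLength mask : Int) 1).foldl
    (fun newMask p =>
      if PySem.Int.band (mask >>> p.toNat) 1 ≠ 0 then
        PySem.Int.bor newMask ((1 : Int) <<< (PySem.List.pyGetD mapping p 0).toNat)
      else newMask) 0

-- ===== PRECONDITION & SPEC =====
-- Pre_ excludes exactly the inputs where Python A does not return normally:
-- mask < 0 (the 'while m' loop never terminates), a set bit position past the end of
-- mapping (IndexError), and a set bit mapped to a negative position (ValueError on 1 << neg).
def Pre_transform_mask (mask : Int) (mapping : List Int) : Prop :=
  0 ≤ mask ∧ ∀ p ∈ List.range (PySem.Int.bitLength mask),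
    mask.toNat.testBit p = true → p < mapping.length ∧ 0 ≤ mapping.getD p 0
instance (mask : Int) (mapping : List Int) : Decidable (Pre_transform_mask mask mapping) := by
  unfold Pre_transform_mask; infer_instance
def pvWitness_transform_mask : Int × List Int := (5, [2, 0, 1])

def Spec_transform_mask (mask : Int) (mapping : List Int) (out : Int) : Prop := out = transform_mask_alt mask mapping
instance (mask : Int) (mapping : List Int) (out : Int) : Decidable (Spec_transform_mask mask mapping out) := by unfold Spec_transform_mask; infer_instance

-- ===== CLAIM (what is proved, stated in full; the proofs are below) =====
def Claim_equal_transform_mask : Prop := ∀ (mask : Int) (mapping : List Int), Dom_transform_mask mask mapping → Pre_transform_mask mask mapping → Spec_transform_mask mask mapping (transform_mask mask mapping)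

-- ===== LEMMAS AND PROOFS =====

-- The common per-position step, over the Nat value n of the current mask.
def stepF (mapping : List Int) (n : Nat) (acc : Int) (p : Nat) : Int :=
  if n.testBit p then PySem.Int.bor acc ((1 : Int) <<< (mapping.getD p 0).toNat) else acc

theorem stepF_skip (mapping : List Int) (n : Nat) :
    ∀ (l : List Nat) (a : Int), (∀ p ∈ l, n.testBit p = false) → l.foldl (stepF mapping n) a = a := by
  intro l
  induction l with
  | nil => intro a _; rfl
  | cons x xs ih =>
    intro a h
    simp only [List.foldl_cons]
    rw [show stepF mapping n a x = a by simp [stepF, h x (by simp)]]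
    exact ih a (fun p hp => h p (by simp [hp]))

theorem stepF_agree (mapping : List Int) (n n' : Nat) :
    ∀ (l : List Nat) (a : Int), (∀ p ∈ l, n.testBit p = n'.testBit p) → l.foldl (stepF mapping n) a = l.foldl (stepF mapping n') a := by
  intro l
  induction l with
  | nil => intro a _; rfl
  | cons x xs ih =>
    intro a h
    simp only [List.foldl_cons]
    rw [show stepF mapping n a x = stepF mapping n' a x by simp [stepF, h x (by simp)]]
    exact ih _ (fun p hp => h p (by simp [hp]))

theorem testBit_false_of_ge_bitLength (n p : Nat) (h : PySem.Int.bitLength (n : Int) ≤ p) :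
    n.testBit p = false := by
  apply Nat.testBit_lt_two_pow
  calc n = (n : Int).natAbs := by simp
    _ < 2 ^ PySem.Int.bitLength (n : Int) := PySem.Int.lt_two_pow_bitLength _
    _ ≤ 2 ^ p := Nat.pow_le_pow_right (by norm_num) h

theorem lt_bitLength_of_testBit (n t : Nat) (h : n.testBit t = true) :
    t < PySem.Int.bitLength (n : Int) := by
  by_contra hc
  rw [testBit_false_of_ge_bitLength n t (by omega)] at h
  simp at h

-- extend/shrink the scanned range: any N ≥ bitLength gives the same fold
theorem fold_range_norm (mapping : List Int) (n : Nat) (N : Nat)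
    (hN : PySem.Int.bitLength (n : Int) ≤ N) (a : Int) :
    (List.range N).foldl (stepF mapping n) a = (List.range (PySem.Int.bitLength (n : Int))).foldl (stepF mapping n) a := by
  set B := PySem.Int.bitLength (n : Int) with hB
  rw [show N = B + (N - B) by omega, List.range_add, List.foldl_append]
  rw [stepF_skip mapping n (List.map (fun x => B + x) (List.range (N - B))) _ ?_]
  intro p hp
  simp only [List.mem_map, List.mem_range] at hp
  obtain ⟨x, _, rfl⟩ := hp
  exact testBit_false_of_ge_bitLength n (B + x) (by omega)

-- bit length of a power of two
theorem bitLength_two_pow (t : Nat) : PySem.Int.bitLength ((2 ^ t : Nat) : Int) = t + 1 := by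
  set B := PySem.Int.bitLength ((2 ^ t : Nat) : Int) with hB
  have h1 : (2 ^ t : Nat) < 2 ^ B := by
    have := PySem.Int.lt_two_pow_bitLength ((2 ^ t : Nat) : Int); simpa using this
  have h2 : 2 ^ (B - 1) ≤ 2 ^ t := by
    have := PySem.Int.two_pow_bitLength_le ((2 ^ t : Nat) : Int) (by positivity)
    simpa using this
  have ht : t < B := (Nat.pow_lt_pow_iff_right (by norm_num)).mp h1
  have ht2 : B - 1 ≤ t := (Nat.pow_le_pow_iff_right (by norm_num)).mp h2
  omega

-- the lowest set bit: n - (n &&& (n-1)) is a power of two, it is a set bit of n,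
-- and every lower bit is clear
theorem lsb_nat_spec : ∀ n : Nat, 0 < n →
    ∃ t, n - (n &&& (n - 1)) = 2 ^ t ∧ n.testBit t = true ∧ ∀ i < t, n.testBit i = false := by
  intro n
  induction n using Nat.strong_induction_on with
  | _ n ih =>
    intro hn
    rcases Nat.even_or_odd n with he | ho
    · -- n even: n = 2k, recurse on k
      obtain ⟨k, hk⟩ := he
      have hk2 : n = 2 * k := by omega
      have hkpos : 0 < k := by omega
      obtain ⟨t, h1, h2, h3⟩ := ih k (by omega) hkpos
      have hand : n &&& (n - 1) = 2 * (k &&& (k - 1)) := by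
        apply Nat.eq_of_testBit_eq
        intro i
        cases i with
        | zero =>
          simp only [Nat.testBit_zero]
          have : n % 2 = 0 := by omega
          have : (2 * (k &&& (k - 1))) % 2 = 0 := by omega
          simp_all
        | succ j =>
          have e1 : n / 2 = k := by omega
          have e2 : (n - 1) / 2 = k - 1 := by omega
          have e3 : (2 * (k &&& (k - 1))) / 2 = k &&& (k - 1) := by omega
          rw [Nat.testBit_and, Nat.testBit_succ, Nat.testBit_succ, Nat.testBit_succ,
              e1, e2, e3, Nat.testBit_and]
      have hle : k &&& (k - 1) ≤ k := Nat.and_le_left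
      refine ⟨t + 1, ?_, ?_, ?_⟩
      · rw [hand, hk2]
        have : 2 * k - 2 * (k &&& (k - 1)) = 2 * (k - (k &&& (k - 1))) := by omega
        rw [this, h1, pow_succ]; ring
      · rw [Nat.testBit_succ, show n / 2 = k by omega]; exact h2
      · intro i hi
        cases i with
        | zero =>
          rw [Nat.testBit_zero]
          have : n % 2 = 0 := by omega
          simp [this]
        | succ j =>
          rw [Nat.testBit_succ, show n / 2 = k by omega]
          exact h3 j (by omega)
    · -- n odd: lowest set bit is bit 0, and n &&& (n-1) = n - 1
      refine ⟨0, ?_, ?_, by omega⟩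
      · have hand : n &&& (n - 1) = n - 1 := by
          apply Nat.eq_of_testBit_eq
          intro i
          cases i with
          | zero =>
            simp only [Nat.testBit_zero]
            have h1 : n % 2 = 1 := Nat.odd_iff.mp ho
            have h2 : (n - 1) % 2 = 0 := by omega
            simp [h1, h2]
          | succ j =>
            have h1 : n % 2 = 1 := Nat.odd_iff.mp ho
            rw [Nat.testBit_and, Nat.testBit_succ, Nat.testBit_succ,
                show n / 2 = (n - 1) / 2 by omega]
            simp
        rw [hand]
        have h1 : n % 2 = 1 := Nat.odd_iff.mp ho
        omega
      · rw [Nat.testBit_zero]; simp [Nat.odd_iff.mp ho]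

-- PySem band of n and -n, for positive n, is the Nat lsb computation
theorem band_neg_self (n : Nat) (hn : 0 < n) :
    PySem.Int.band (n : Int) (-(n : Int)) = ((n - (n &&& (n - 1)) : Nat) : Int) := by
  simp only [PySem.Int.band]
  rw [if_pos (by positivity), if_neg (by omega)]
  congr 1
  have h1 : ((n : Int)).toNat = n := by simp
  have h2 : (-(-(n : Int)) - 1).toNat = n - 1 := by omega
  rw [h1, h2]

-- one unfolding step of A's loop, in terms of the Nat mask
theorem tmLoopA_eq_fold (mapping : List Int) :
    ∀ n : Nat, ∀ fuel a, n < fuel →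
      tmLoopA mapping fuel a (n : Int) =
        (List.range (PySem.Int.bitLength (n : Int))).foldl (stepF mapping n) a := by
  intro n
  induction n using Nat.strong_induction_on with
  | _ n ih =>
    intro fuel a hfuel
    match fuel with
    | 0 => omega
    | fuel + 1 =>
      by_cases hz : n = 0
      · subst hz
        simp [tmLoopA, PySem.Int.bitLength_zero]
      · have hn : 0 < n := by omega
        obtain ⟨t, hlsb, hbit, hlow⟩ := lsb_nat_spec n hn
        have hsub : n &&& (n - 1) ≤ n := Nat.and_le_left
        rw [tmLoopA, if_neg (by exact_mod_cast hz)]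
        simp only [band_neg_self n hn, hlsb, bitLength_two_pow, Nat.add_sub_cancel]
        -- the new mask value after clearing bit t
        set n' : Nat := n ^^^ 2 ^ t with hn'
        have hbits' : ∀ i, n'.testBit i = (n.testBit i ^^ decide (t = i)) := by
          intro i; rw [hn', Nat.testBit_xor, Nat.testBit_two_pow]
        have hbt' : n'.testBit t = false := by simp [hbits' t, hbit]
        have hhigh : ∀ j, t < j → n'.testBit j = n.testBit j := by
          intro j hj; rw [hbits' j]; simp [show ¬ (t = j) by omega]
        have hlt : n' < n := Nat.lt_of_testBit t hbt' hbit hhigh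
        have hxor : PySem.Int.bxor (n : Int) ((2 ^ t : Nat) : Int) = (n' : Int) := by
          rw [show ((2 ^ t : Nat) : Int) = ((2 ^ t : Nat) : Int) from rfl, PySem.Int.bxor_natCast]
        rw [hxor, ih n' hlt fuel _ (by omega)]
        -- now both sides are folds; relate them
        set a' := PySem.Int.bor a ((1 : Int) <<< (PySem.List.pyGetD mapping (t : Int) 0).toNat) with ha'
        have hstep_t : stepF mapping n a t = a' := by
          simp [stepF, hbit, ha', PySem.List.pyGetD_natCast]
        set B := PySem.Int.bitLength (n : Int) with hB
        have htB : t < B := lt_bitLength_of_testBit n t hbit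
        -- RHS-of-goal : fold over range B of stepF n from a
        have hsplit : List.range B = List.range (t + 1) ++ (List.range (B - t - 1)).map (fun x => t + 1 + x) := by
          rw [← List.range_add]; congr 1; omega
        rw [hsplit, List.foldl_append, List.range_succ, List.foldl_append]
        rw [stepF_skip mapping n (List.range t) a
              (fun p hp => hlow p (List.mem_range.mp hp))]
        simp only [List.foldl_cons, List.foldl_nil, hstep_t]
        -- remaining positions are > t: switch the step's mask from n to n'
        rw [stepF_agree mapping n n' (List.map (fun x => t + 1 + x) (List.range (B - t - 1))) a' ?_]
        · -- extend to a fold over range B with n', then shrink to bitLength n'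
          have hext : (List.range B).foldl (stepF mapping n') a' =
              (List.map (fun x => t + 1 + x) (List.range (B - t - 1))).foldl (stepF mapping n') a' := by
            rw [hsplit, List.foldl_append]
            rw [stepF_skip mapping n' (List.range (t + 1)) a' ?_]
            intro p hp
            rcases Nat.lt_succ_iff_lt_or_eq.mp (List.mem_range.mp hp) with h | h
            · rw [hbits' p]; simp [hlow p h, show ¬ (t = p) by omega]
            · subst h; exact hbt'
          rw [← hext]
          have hble : PySem.Int.bitLength ((n' : Nat) : Int) ≤ B := by
            by_contra hc
            have h1 : n' ≠ 0 → 2 ^ (PySem.Int.bitLength ((n' : Nat) : Int) - 1) ≤ n' := by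
              intro h
              have := PySem.Int.two_pow_bitLength_le ((n' : Nat) : Int) (by exact_mod_cast h)
              simpa using this
            have h2 : n < 2 ^ B := by
              have := PySem.Int.lt_two_pow_bitLength ((n : Nat) : Int); simpa using this
            by_cases h0 : n' = 0
            · rw [h0] at hc; simp [PySem.Int.bitLength_zero] at hc
            · have := h1 h0
              have : 2 ^ B ≤ 2 ^ (PySem.Int.bitLength ((n' : Nat) : Int) - 1) :=
                Nat.pow_le_pow_right (by norm_num) (by omega)
              omega
          exact (fold_range_norm mapping n' B hble a').symm
        · intro p hp
          simp only [List.mem_map, List.mem_range] at hp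
          obtain ⟨x, _, rfl⟩ := hp
          exact (hhigh (t + 1 + x) (by omega)).symm

-- B's fold over pyRange equals the fold of stepF
theorem alt_eq_fold (mapping : List Int) (n : Nat) :
    transform_mask_alt (n : Int) mapping =
      (List.range (PySem.Int.bitLength (n : Int))).foldl (stepF mapping n) 0 := by
  unfold transform_mask_alt
  set B := PySem.Int.bitLength (n : Int) with hB
  have hrange : PySem.List.pyRange 0 (B : Int) 1 = (List.range B).map (fun k : Nat => (k : Int)) := by
    simp only [PySem.List.pyRange]
    rw [if_neg (by norm_num)]
    by_cases h : 0 < B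
    · rw [if_pos (by norm_num), if_pos (by exact_mod_cast h)]
      have : (((B : Int) - 0 + 1 - 1) / 1).toNat = B := by simp
      rw [this]
      simp
    · have hB0 : B = 0 := by omega
      rw [hB0]
      simp
  rw [hrange, List.foldl_map]
  apply PySem.List.foldl_congr_mem
  intro acc p hp
  have hacc : PySem.Int.band ((n : Int) >>> (((((p : Int)).toNat : Nat)) : Int)) 1 =
      (((n >>> p) &&& 1 : Nat) : Int) := by
    rw [show ((n : Int) >>> ((((p : Int)).toNat : Nat) : Int)) = (n : Int) >>> (((p : Int)).toNat : Nat) by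
          simp [Int.shiftRight_eq]]
    have h1 : ((p : Int)).toNat = p := by simp
    have h2 : (n : Int) >>> p = ((n >>> p : Nat) : Int) := by
      simp [Int.shiftRight_eq, Int.natCast_shiftRight]
    rw [h1, h2, show (1 : Int) = ((1 : Nat) : Int) from rfl, PySem.Int.band_natCast]
  rw [hacc]
  have hmod : (n >>> p) &&& 1 = (n >>> p) % 2 := Nat.and_one_is_mod _
  have hbit : n.testBit p = decide ((n >>> p) % 2 = 1) := by
    simp [Nat.testBit]
  by_cases hm : (n >>> p) % 2 = 1
  · rw [if_pos (by simp [hmod, hm]), stepF, if_pos (by simp [hbit, hm])]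
    simp [PySem.List.pyGetD_natCast]
  · have h0 : (n >>> p) % 2 = 0 := by omega
    rw [if_neg (by simp [hmod, h0]), stepF, if_neg (by simp [hbit, hm])]

-- ===== VERDICT (by name: the statement is the Claim_ definition above) =====
theorem transform_mask_spec : Claim_equal_transform_mask := by
  intro mask mapping _ hpre
  unfold Spec_transform_mask
  obtain ⟨hge, _⟩ := hpre
  obtain ⟨n, rfl⟩ : ∃ n : Nat, mask = (n : Int) := ⟨mask.toNat, (Int.toNat_of_nonneg hge).symm⟩
  rw [transform_mask, show ((n : Int)).natAbs = n by simp,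
      tmLoopA_eq_fold mapping n (n + 1) 0 (by omega), alt_eq_fold]
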